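-- pv_equiv track=rewrite | github.com/sriniraghunathan/CMB_BAO_SNe_likelihoods | modules/misc_getdist.py | convert_param_to_latex
-- ===== SOURCE A (Python) =====
-- def convert_param_to_latex(param):
--     greek_words_small = ['alpha', 'beta', 'gamma', 'delta', 'epsilon', 'zeta', 'eta', 'theta', 'iota', 'kappa',
--                         'lambda', 'mu', 'nu', 'omicron', 'pi', 'rho', 'sigma', 'tau', 'upsilon', 'phi', 'chi', 'psi', 'omega']
--     greek_words_captial = [w.capitalize() for w in greek_words_small]
--     greek_words = greek_words_small + greek_words_captial
--     math_words = ['z']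
--
--     tmp_param_split = param.split('_')
--     if len( tmp_param_split ) == 1:
--         latex_param = r'$%s$' %(param)
--     else:
--         tmpval = tmp_param_split[0]
--         if tmpval in greek_words:
--             tmpval = '\%s' %(tmpval)
--         latex_param = '%s' %(tmpval)
--         braces_arr = ''
--         for tmpval in tmp_param_split[1:]:
--             if tmpval in greek_words:
--                 tmpval = '\%s' %(tmpval)
--             if tmpval in math_words:
--                 latex_param = '%s_{%s' %(latex_param, tmpval)
--             else:
--                 latex_param = '%s_{\\rm %s' %(latex_param, tmpval)
--             braces_arr = '%s}' %(braces_arr)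
--         latex_param = '%s%s' %(latex_param, braces_arr)
--         latex_param  = r'$%s$' %(latex_param)
--
--     return latex_param
-- ===== SOURCE B (Python) =====
-- GREEK_SMALL = ['alpha', 'beta', 'gamma', 'delta', 'epsilon', 'zeta', 'eta', 'theta',
--                'iota', 'kappa', 'lambda', 'mu', 'nu', 'omicron', 'pi', 'rho', 'sigma',
--                'tau', 'upsilon', 'phi', 'chi', 'psi', 'omega']
-- GREEK = set(GREEK_SMALL) | {w.capitalize() for w in GREEK_SMALL}
-- MATH_WORDS = ('z',)
--
--
-- def _greek_sub(t):
--     return '\\' + t if t in GREEK else t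
--
--
-- def _seg(t):
--     g = _greek_sub(t)
--     return ('_{%s' if g in MATH_WORDS else '_{\\rm %s') % g
--
--
-- def _rec(tokens):
--     if not tokens:
--         return ''
--     return _seg(tokens[0]) + _rec(tokens[1:]) + '}'
--
--
-- def convert_param_to_latex(param):
--     parts = param.split('_')
--     if len(parts) == 1:
--         return '$%s$' % param
--     return '$%s%s$' % (_greek_sub(parts[0]), _rec(parts[1:]))
-- ===== Notes on version B (the rewrite author's own statement) =====
-- stated objective: alternative
-- what changed: Replaces A's loop that threads two accumulators (the growing prefix and a separate string of closing braces glued on at the end) with a per-token formatter and a structural recursion over the tail tokens that closes each brace locally.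
import Mathlib
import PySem

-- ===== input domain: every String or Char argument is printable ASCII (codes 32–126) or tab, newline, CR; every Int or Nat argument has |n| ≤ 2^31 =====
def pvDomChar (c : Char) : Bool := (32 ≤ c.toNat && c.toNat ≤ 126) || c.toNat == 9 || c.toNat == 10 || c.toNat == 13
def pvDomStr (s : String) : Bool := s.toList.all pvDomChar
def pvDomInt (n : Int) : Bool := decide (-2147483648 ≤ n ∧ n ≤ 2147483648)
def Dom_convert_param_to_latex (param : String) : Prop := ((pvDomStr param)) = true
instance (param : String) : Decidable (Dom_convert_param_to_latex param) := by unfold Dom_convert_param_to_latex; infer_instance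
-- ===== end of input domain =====

-- B replaces A's two-accumulator loop (prefix + deferred closing braces) with a per-token
-- formatter and a structural recursion over the tail tokens that closes each brace locally.

-- ===== PORT A =====
-- the greek word lists; w.capitalize() is ported as uppercasing the first char
-- (exact here: every listed word is all-lowercase ASCII)
def pvGreekSmall : List (List Char) :=
  ["alpha".toList, "beta".toList, "gamma".toList, "delta".toList, "epsilon".toList,
   "zeta".toList, "eta".toList, "theta".toList, "iota".toList, "kappa".toList,
   "lambda".toList, "mu".toList, "nu".toList, "omicron".toList, "pi".toList,
   "rho".toList, "sigma".toList, "tau".toList, "upsilon".toList, "phi".toList,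
   "chi".toList, "psi".toList, "omega".toList]

def pvCapitalize (w : List Char) : List Char :=
  match w with
  | [] => []
  | c :: cs => PySem.Chars.upperChar c :: cs

def pvGreek : List (List Char) := pvGreekSmall ++ pvGreekSmall.map pvCapitalize

def pvMathWords : List (List Char) := [['z']]

def convert_param_to_latex (param : String) : String :=
  let parts := PySem.Chars.splitOn param.toList ['_']
  if parts.length == 1 then
    String.ofList ('$' :: param.toList ++ ['$'])
  else
    let tmpval := parts.headD []
    let tmpval := if pvGreek.contains tmpval then '\\' :: tmpval else tmpval
    let st := (parts.drop 1).foldl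
      (fun (st : List Char × List Char) t =>
        let t := if pvGreek.contains t then '\\' :: t else t
        let latex := if pvMathWords.contains t then st.1 ++ "_{".toList ++ t
                     else st.1 ++ "_{\\rm ".toList ++ t
        (latex, st.2 ++ ['}'])) (tmpval, [])
    String.ofList ('$' :: (st.1 ++ st.2) ++ ['$'])

-- ===== PORT B =====
def pvGreekSub (t : List Char) : List Char :=
  if pvGreek.contains t then '\\' :: t else t

def pvSeg (t : List Char) : List Char :=
  let g := pvGreekSub t
  if pvMathWords.contains g then "_{".toList ++ g else "_{\\rm ".toList ++ g

def pvRec : List (List Char) → List Char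
  | [] => []
  | t :: rest => pvSeg t ++ pvRec rest ++ ['}']

def convert_param_to_latex_alt (param : String) : String :=
  let parts := PySem.Chars.splitOn param.toList ['_']
  if parts.length == 1 then
    String.ofList ('$' :: param.toList ++ ['$'])
  else
    String.ofList ('$' :: (pvGreekSub (parts.headD []) ++ pvRec (parts.drop 1)) ++ ['$'])

-- ===== PRECONDITION & SPEC =====
def Spec_convert_param_to_latex (param : String) (out : String) : Prop := out = convert_param_to_latex_alt param
instance (param : String) (out : String) : Decidable (Spec_convert_param_to_latex param out) := by unfold Spec_convert_param_to_latex; infer_instance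

-- ===== CLAIM (what is proved, stated in full; the proofs are below) =====
def Claim_equal_convert_param_to_latex : Prop := ∀ (param : String), Dom_convert_param_to_latex param → Spec_convert_param_to_latex param (convert_param_to_latex param)

-- ===== LEMMAS AND PROOFS =====

-- A's loop state: the accumulated prefix and k closing braces; its flattening is pvRec
lemma foldl_eq_rec (ts : List (List Char)) :
    ∀ (latex : List Char) (k : ℕ),
    (ts.foldl
      (fun (st : List Char × List Char) t =>
        let t := if pvGreek.contains t then '\\' :: t else t
        let latex := if pvMathWords.contains t then st.1 ++ "_{".toList ++ t
                     else st.1 ++ "_{\\rm ".toList ++ t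
        (latex, st.2 ++ ['}'])) (latex, List.replicate k '}')).1 ++
    (ts.foldl
      (fun (st : List Char × List Char) t =>
        let t := if pvGreek.contains t then '\\' :: t else t
        let latex := if pvMathWords.contains t then st.1 ++ "_{".toList ++ t
                     else st.1 ++ "_{\\rm ".toList ++ t
        (latex, st.2 ++ ['}'])) (latex, List.replicate k '}')).2 =
    latex ++ pvRec ts ++ List.replicate k '}' := by
  induction ts with
  | nil => intro latex k; simp [pvRec]
  | cons t rest ih =>
    intro latex k
    have hrep : List.replicate k '}' ++ ['}'] = List.replicate (k + 1) '}' := by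
      simp [List.replicate_succ']
    simp only [List.foldl_cons, hrep]
    rw [ih]
    have hrep' : List.replicate (k + 1) '}' = '}' :: List.replicate k '}' := by
      simp [List.replicate_succ]
    rw [hrep']
    simp only [pvRec, pvSeg, pvGreekSub]
    split_ifs <;> simp
theorem convert_param_to_latex_spec : Claim_equal_convert_param_to_latex := by
  intro param _
  unfold Spec_convert_param_to_latex convert_param_to_latex convert_param_to_latex_alt
  by_cases h : (PySem.Chars.splitOn param.toList ['_']).length == 1
  · simp [h]
  · have key := foldl_eq_rec ((PySem.Chars.splitOn param.toList ['_']).drop 1)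
      (pvGreekSub ((PySem.Chars.splitOn param.toList ['_']).headD [])) 0
    simp only [List.replicate_zero, List.append_nil] at key
    simp only [h, Bool.false_eq_true, if_false, pvGreekSub] at key ⊢
    rw [key]

-- ===== VERDICT =====
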